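-- pv_equiv track=rewrite | github.com/jocelyn-chang/university-ranking-system | univRanking.py | nationalRank
-- ===== SOURCE A (Python) =====
-- def nationalRank(info, selectedCountry):  # function finds the university with the best national rank in selected country
--     rank = 0
--     school = ""
--     for item in info:
--         if selectedCountry in item:
--             rank = int(item[3])  # sets beginning values to compare with other values later
--             school = item[1]
--             break
--     for item in info:
--         if selectedCountry in item:
--             if int(item[3]) < rank:
--                 rank = int(item[3])
--                 school = item[1]
--     line = f'At national rank => %d the university name is => %s\n' % (rank, school)
--     return line
-- ===== SOURCE B (Python) =====
-- def nationalRank(info, selectedCountry):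
--     ranked = sorted((item for item in info if selectedCountry in item),
--                     key=lambda it: int(it[3]))
--     if ranked:
--         rank, school = int(ranked[0][3]), ranked[0][1]
--     else:
--         rank, school = 0, ""
--     return 'At national rank => %d the university name is => %s\n' % (rank, school)
-- ===== Notes on version B (the rewrite author's own statement) =====
-- stated objective: alternative
-- what changed: Replaces A's two explicit scans (find-first then strict-< running minimum) with a stable sort of the matching rows by int(row[3]) and taking the first sorted element (stability preserves A's first-wins tie behaviour).
import Mathlib
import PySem

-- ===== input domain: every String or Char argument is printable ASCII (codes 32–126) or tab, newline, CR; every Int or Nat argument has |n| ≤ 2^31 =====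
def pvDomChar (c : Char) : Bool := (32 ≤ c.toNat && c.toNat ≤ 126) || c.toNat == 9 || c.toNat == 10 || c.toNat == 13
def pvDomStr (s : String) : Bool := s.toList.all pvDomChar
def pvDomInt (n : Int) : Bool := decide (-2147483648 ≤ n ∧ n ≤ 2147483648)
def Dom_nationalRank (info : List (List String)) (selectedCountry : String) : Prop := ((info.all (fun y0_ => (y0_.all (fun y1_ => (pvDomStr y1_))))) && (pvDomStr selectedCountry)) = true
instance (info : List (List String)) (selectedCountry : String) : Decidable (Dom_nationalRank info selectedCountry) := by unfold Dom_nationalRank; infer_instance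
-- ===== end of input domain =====

-- B replaces A's two explicit scans (find-first, then strict-< running minimum) by a stable sort of the matching rows by int(row[3]) and taking the first sorted row; same result by stability.

-- int(item[3]) as both Pythons compute it (total form; Pre_ guarantees index and parse succeed)
def pvKey (item : List String) : Int := (PySem.Int.ofStr? (PySem.List.pyGetD item 3 "")).getD 0
def pvSchool (item : List String) : String := PySem.List.pyGetD item 1 ""
def pvFmt (rank : Int) (school : String) : String :=
  "At national rank => " ++ PySem.Int.toStr rank ++ " the university name is => " ++ school ++ "\n"

-- ===== PORT A =====
-- first loop of A: scan until the first matching row, break with its (rank, school)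
def pvFirstA (info : List (List String)) (c : String) : Int × String :=
  match info with
  | [] => (0, "")
  | item :: rest => if c ∈ item then (pvKey item, pvSchool item) else pvFirstA rest c

def nationalRank (info : List (List String)) (selectedCountry : String) : String :=
  let st := info.foldl
    (fun (st : Int × String) item =>
      if selectedCountry ∈ item then
        (if pvKey item < st.1 then (pvKey item, pvSchool item) else st)
      else st)
    (pvFirstA info selectedCountry)
  pvFmt st.1 st.2

-- ===== PORT B =====
def nationalRank_alt (info : List (List String)) (selectedCountry : String) : String :=
  let ranked := PySem.List.sorted (info.filter (fun item => decide (selectedCountry ∈ item))) pvKey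
  match ranked.head? with
  | some best => pvFmt (pvKey best) (pvSchool best)
  | none => pvFmt 0 ""

-- ===== PRECONDITION & SPEC =====
-- Pre_ excludes exactly the inputs where Python A raises: a matching row shorter than 4 fields (IndexError) or whose field 3 is not int()-parsable (ValueError).
def Pre_nationalRank (info : List (List String)) (selectedCountry : String) : Prop :=
  ∀ item ∈ info, selectedCountry ∈ item →
    3 < item.length ∧ (PySem.Int.ofStr? (item.getD 3 "")).isSome = true
instance (info : List (List String)) (selectedCountry : String) : Decidable (Pre_nationalRank info selectedCountry) := by unfold Pre_nationalRank; infer_instance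
def pvWitness_nationalRank : List (List String) × String := ([["US", "MIT", "Cambridge", "2"], ["FR", "ENS", "Paris", "1"]], "US")

def Spec_nationalRank (info : List (List String)) (selectedCountry : String) (out : String) : Prop := out = nationalRank_alt info selectedCountry
instance (info : List (List String)) (selectedCountry : String) (out : String) : Decidable (Spec_nationalRank info selectedCountry out) := by unfold Spec_nationalRank; infer_instance

-- ===== CLAIM (what is proved, stated in full; the proofs are below) =====
def Claim_equal_nationalRank : Prop := ∀ (info : List (List String)) (selectedCountry : String), Dom_nationalRank info selectedCountry → Pre_nationalRank info selectedCountry → Spec_nationalRank info selectedCountry (nationalRank info selectedCountry)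

-- ===== LEMMAS AND PROOFS =====

-- A's first loop is head? of the filtered list
theorem pvFirstA_eq (info : List (List String)) (c : String) :
    pvFirstA info c =
      match (info.filter (fun item => decide (c ∈ item))).head? with
      | some m => (pvKey m, pvSchool m)
      | none => (0, "") := by
  induction info with
  | nil => rfl
  | cons item rest ih =>
    by_cases h : c ∈ item <;> simp [pvFirstA, h, List.filter_cons, ih]

-- head of insertion step: new element wins only with a strictly smaller key
theorem pvHead_insertBy (x : List String) (ys : List (List String)) :
    (PySem.List.insertBy (fun a b => decide (pvKey a < pvKey b)) x ys).head? =
      some (match ys.head? with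
            | none => x
            | some m => if pvKey x < pvKey m then x else m) := by
  cases ys with
  | nil => rfl
  | cons y t =>
    by_cases h : pvKey x < pvKey y <;> simp [PySem.List.insertBy, h]

-- the first-wins strict-< minimum step, as min? folds it
def pvMinStep (o : Option (List String)) (x : List String) : Option (List String) :=
  match o with
  | none => some x
  | some m => if pvKey x < pvKey m then some x else some m

theorem pvMin?_eq_foldl (xs : List (List String)) :
    PySem.List.min? xs pvKey = xs.foldl pvMinStep none := by
  rw [PySem.List.min?]
  congr 1
  funext o x
  cases o <;> rfl

-- head of the insertion-sort foldl is the first-wins strict-< minimum foldl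
theorem pvHead_sort_foldl (xs : List (List String)) :
    ∀ acc : List (List String),
      (xs.foldl (fun acc x => PySem.List.insertBy (fun a b => decide (pvKey a < pvKey b)) x acc) acc).head? =
      xs.foldl pvMinStep acc.head? := by
  induction xs with
  | nil => intro acc; rfl
  | cons x rest ih =>
    intro acc
    rw [List.foldl_cons, List.foldl_cons, ih, pvHead_insertBy]
    cases acc with
    | nil => rfl
    | cons m t => by_cases h : pvKey x < pvKey m <;> simp [pvMinStep, h]

-- head of the stable sort = first minimal element (min?)
theorem pvHead_sorted_eq_min? (xs : List (List String)) :
    (PySem.List.sorted xs pvKey).head? = PySem.List.min? xs pvKey := by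
  rw [pvMin?_eq_foldl, PySem.List.sorted]
  exact pvHead_sort_foldl xs []

-- both A's loop body over the filtered tail and min? compute the same winner
def pvPick (rest : List (List String)) (m : List String) : List String :=
  rest.foldl (fun m x => if pvKey x < pvKey m then x else m) m

theorem pvLoop_eq (rest : List (List String)) :
    ∀ m : List String,
      rest.foldl (fun (st : Int × String) item =>
          if pvKey item < st.1 then (pvKey item, pvSchool item) else st)
          (pvKey m, pvSchool m)
        = (pvKey (pvPick rest m), pvSchool (pvPick rest m)) ∧
      PySem.List.min? (m :: rest) pvKey = some (pvPick rest m) := by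
  induction rest with
  | nil => intro m; exact ⟨rfl, rfl⟩
  | cons x rest ih =>
    intro m
    have hmin : PySem.List.min? (m :: x :: rest) pvKey
        = PySem.List.min? ((if pvKey x < pvKey m then x else m) :: rest) pvKey := by
      by_cases h : pvKey x < pvKey m <;> simp [pvMin?_eq_foldl, pvMinStep, h]
    rw [hmin]
    by_cases h : pvKey x < pvKey m <;>
      simpa [pvPick, List.foldl_cons, h] using ih (if pvKey x < pvKey m then x else m)

theorem nationalRank_eq_alt (info : List (List String)) (c : String) :
    nationalRank info c = nationalRank_alt info c := by
  simp only [nationalRank, nationalRank_alt]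
  rw [pvFirstA_eq, pvHead_sorted_eq_min?]
  have hstep : (fun (st : Int × String) item =>
        if c ∈ item then
          (if pvKey item < st.1 then (pvKey item, pvSchool item) else st)
        else st)
      = (fun (st : Int × String) item =>
        if (fun it => decide (c ∈ it)) item = true then
          (if pvKey item < st.1 then (pvKey item, pvSchool item) else st)
        else st) := by
    funext st item
    by_cases h : c ∈ item <;> simp [h]
  rw [hstep, ← List.foldl_filter]
  cases hm : info.filter (fun item => decide (c ∈ item)) with
  | nil => rfl
  | cons m0 rest =>
    have h := pvLoop_eq rest m0
    simp only [List.head?_cons, List.foldl_cons, lt_self_iff_false, if_false]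
    rw [h.1, h.2]

-- ===== VERDICT (by name: the statement is the Claim_ definition above) =====
theorem nationalRank_spec : Claim_equal_nationalRank := by
  intro info c _ _
  exact nationalRank_eq_alt info c
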